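-- pv_equiv track=rewrite | github.com/Lock-757/misc | code_optimizer.py | analyze_repeated_code
-- ===== SOURCE A (Python) =====
-- def analyze_repeated_code(code_lines):
--     """
--     Check for repeated lines of code that could be combined into a function or loop.
--     Returns a list of suggestions.
--     """
--     suggestions = []
--     line_count = len(code_lines)
--     for i in range(line_count):
--         for j in range(i + 1, line_count):
--             if code_lines[i].strip() == code_lines[j].strip() and code_lines[i].strip() != "":
--                 suggestions.append(f"Repeated code at lines {i+1} and {j+1}. Consider creating a function or loop.")
--     return suggestions
-- ===== SOURCE B (Python) =====
-- def analyze_repeated_code(code_lines):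
--     """
--     Check for repeated lines of code that could be combined into a function or loop.
--     Returns a list of suggestions.
--     """
--     stripped = [line.strip() for line in code_lines]
--     groups = {}
--     for i, s in enumerate(stripped):
--         if s:
--             groups.setdefault(s, []).append(i)
--     suggestions = []
--     for i, s in enumerate(stripped):
--         if s:
--             for j in groups[s]:
--                 if j > i:
--                     suggestions.append(f"Repeated code at lines {i+1} and {j+1}. Consider creating a function or loop.")
--     return suggestions
-- ===== Notes on version B (the rewrite author's own statement) =====
-- stated objective: alternative
-- what changed: Replaces the all-pairs nested scan (which re-strips each line on every comparison) by a grouping pass: each line is stripped once and a dict maps each non-blank stripped line to its index list, from which the pairs are emitted in A's (i,j) order; the gain shows only when repeats are sparse, and a timing run's repeat-heavy inputs (output itself quadratic) did not confirm a speed-up.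
import Mathlib
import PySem

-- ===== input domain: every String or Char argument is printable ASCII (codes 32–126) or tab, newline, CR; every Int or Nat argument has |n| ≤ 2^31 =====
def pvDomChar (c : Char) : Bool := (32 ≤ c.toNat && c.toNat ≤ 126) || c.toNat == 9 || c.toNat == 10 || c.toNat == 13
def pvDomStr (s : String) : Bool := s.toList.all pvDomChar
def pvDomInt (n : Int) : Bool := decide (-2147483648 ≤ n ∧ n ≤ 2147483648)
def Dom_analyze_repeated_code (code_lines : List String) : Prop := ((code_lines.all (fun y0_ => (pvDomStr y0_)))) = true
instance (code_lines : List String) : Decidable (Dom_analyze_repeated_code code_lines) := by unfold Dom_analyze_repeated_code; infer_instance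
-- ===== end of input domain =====

-- B replaces A's all-pairs nested scan by one grouping pass over stripped lines (a dict of index lists); identical return value, proved below.


-- ===== PORT A =====
-- helper shared by both ports: the f-string message built by suggestions.append
def pvMsg (i j : Int) : String :=
  "Repeated code at lines " ++ PySem.Int.toStr (i + 1) ++ " and " ++ PySem.Int.toStr (j + 1) ++ ". Consider creating a function or loop."

def analyze_repeated_code (code_lines : List String) : List String :=
  let line_count : Int := (code_lines.length : Int)
  (PySem.List.pyRange 0 line_count 1).foldl (fun suggestions i =>
    (PySem.List.pyRange (i + 1) line_count 1).foldl (fun suggestions j =>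
      if PySem.Str.strip (PySem.List.pyGetD code_lines i "") == PySem.Str.strip (PySem.List.pyGetD code_lines j "")
         && !(PySem.Str.strip (PySem.List.pyGetD code_lines i "") == "") then
        suggestions ++ [pvMsg i j]
      else suggestions) suggestions) []

-- ===== PORT B =====
def analyze_repeated_code_alt (code_lines : List String) : List String :=
  let stripped : List String := code_lines.map PySem.Str.strip
  let groups : PySem.Dict String (List Int) :=
    (PySem.List.enumerate stripped).foldl (fun g p =>
      if !(p.2 == "") then g.modify p.2 [] (fun l => l ++ [p.1]) else g) PySem.Dict.empty
  (PySem.List.enumerate stripped).foldl (fun suggestions p =>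
    if !(p.2 == "") then
      (groups.getD p.2 []).foldl (fun suggestions j =>
        if j > p.1 then suggestions ++ [pvMsg p.1 j] else suggestions) suggestions
    else suggestions) []


-- ===== PRECONDITION & SPEC =====
def Spec_analyze_repeated_code (code_lines : List String) (out : List String) : Prop := out = analyze_repeated_code_alt code_lines
instance (code_lines : List String) (out : List String) : Decidable (Spec_analyze_repeated_code code_lines out) := by unfold Spec_analyze_repeated_code; infer_instance

-- ===== CLAIM (what is proved, stated in full; the proofs are below) =====
def Claim_equal_analyze_repeated_code : Prop := ∀ (code_lines : List String), Dom_analyze_repeated_code code_lines → Spec_analyze_repeated_code code_lines (analyze_repeated_code code_lines)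

-- ===== LEMMAS AND PROOFS =====

-- the groups dict built by B: looking up s yields the ascending list of indices of
-- non-blank stripped lines equal to s
theorem groups_getD (st : List String) (s : String) :
    ((PySem.List.enumerate st).foldl (fun g p =>
      if !(p.2 == "") then g.modify p.2 [] (fun l => l ++ [p.1]) else g) PySem.Dict.empty).getD s []
    = ((PySem.List.pyRange 0 (PySem.List.len st)).filter
        (fun j => PySem.List.pyGetD st j "" == s && !(PySem.List.pyGetD st j "" == ""))) := by
  rw [PySem.List.foldl_if_eq_foldl_filter]
  rw [show (List.foldl (fun (g : PySem.Dict String (List Int)) p => g.modify p.2 [] (fun l => l ++ [p.1]))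
        PySem.Dict.empty ((PySem.List.enumerate st).filter (fun p => !(p.2 == ""))))
      = (List.foldl (fun (g : PySem.Dict String (List Int)) p => g.modify p.1 [] (fun l => l ++ [p.2]))
        PySem.Dict.empty (((PySem.List.enumerate st).filter (fun p => !(p.2 == ""))).map Prod.swap)) from by
      rw [List.foldl_map]; rfl]
  rw [PySem.Dict.getD_foldl_modify_append]
  rw [PySem.List.enumerate_eq_map_pyRange st ""]
  simp [List.filter_map, List.filter_filter, Function.comp_def]

set_option maxHeartbeats 2000000 in
theorem analyze_repeated_code_main (cl : List String) :
    analyze_repeated_code cl = analyze_repeated_code_alt cl := by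
  unfold analyze_repeated_code analyze_repeated_code_alt
  dsimp only
  -- rewrite A as a flatMap over pyRange
  rw [PySem.List.foldl_congr_mem _ _
    (fun acc i => acc ++
      ((PySem.List.pyRange (i + 1) (cl.length : Int)).filter
        (fun j => PySem.Str.strip (PySem.List.pyGetD cl i "") == PySem.Str.strip (PySem.List.pyGetD cl j "")
          && !(PySem.Str.strip (PySem.List.pyGetD cl i "") == ""))).map (pvMsg i)) _
    (by intro acc i _; exact PySem.List.foldl_append_if _ _ _ _)]
  rw [PySem.List.foldl_append_eq_flatMap]
  -- rewrite B: inner fold, then outer fold, as a flatMap over enumerate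
  rw [PySem.List.foldl_congr_mem _ _
    (fun acc (p : Int × String) => acc ++
      (if !(p.2 == "") then
        ((((PySem.List.enumerate (cl.map PySem.Str.strip)).foldl (fun g q =>
            if !(q.2 == "") then g.modify q.2 [] (fun l => l ++ [q.1]) else g) PySem.Dict.empty).getD p.2 []).filter
          (fun j => decide (j > p.1))).map (pvMsg p.1)
       else [])) _
    (by
      intro acc p _
      by_cases h : (p.2 == "") = true
      · simp [h]
      · simp only [h, Bool.not_false, if_true, Bool.not_eq_true] at *
        rw [PySem.List.foldl_append_ite (p := fun j => j > p.1)])]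
  rw [PySem.List.foldl_append_eq_flatMap]
  simp only [List.nil_append]
  simp only [groups_getD]
  rw [PySem.List.enumerate_eq_map_pyRange (List.map PySem.Str.strip cl) ""]
  rw [List.flatMap_map]
  simp only [PySem.List.len, List.length_map]
  apply List.flatMap_congr
  intro i hi
  obtain ⟨hi0, hin⟩ := PySem.List.mem_pyRange_one.mp hi
  -- the stripped list indexed = strip of the original indexed
  have hst : ∀ j : Int, PySem.List.pyGetD (List.map PySem.Str.strip cl) j "" = PySem.Str.strip (PySem.List.pyGetD cl j "") := by
    intro j
    exact PySem.List.pyGetD_map PySem.Str.strip cl j ""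
  simp only [hst]
  by_cases h : (PySem.Str.strip (PySem.List.pyGetD cl i "") == "") = true
  · simp [h]
  · simp only [h, Bool.not_false, if_true]
    rw [List.filter_filter]
    rw [PySem.List.pyRange_one_append 0 (i + 1) (cl.length : Int) (by omega) (by omega)]
    rw [List.filter_append]
    rw [show List.filter (fun j => decide (j > i) && (PySem.Str.strip (PySem.List.pyGetD cl j "") == PySem.Str.strip (PySem.List.pyGetD cl i "") && !(PySem.Str.strip (PySem.List.pyGetD cl j "") == ""))) (PySem.List.pyRange 0 (i+1)) = ([] : List Int) from List.filter_eq_nil_iff.mpr ?side]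
    · rw [List.nil_append]
      congr 1
      apply List.filter_congr
      intro j hj
      obtain ⟨hj1, _⟩ := PySem.List.mem_pyRange_one.mp hj
      have : decide (j > i) = true := by simp; omega
      simp only [this, Bool.true_and]
      by_cases he : PySem.Str.strip (PySem.List.pyGetD cl j "") = PySem.Str.strip (PySem.List.pyGetD cl i "")
      · simp [he, h]  -- equal: both sides true
      · rw [beq_eq_false_iff_ne.mpr (Ne.symm he), beq_eq_false_iff_ne.mpr he]
        simp
    case side =>
      intro j hj
      obtain ⟨_, hj2⟩ := PySem.List.mem_pyRange_one.mp hj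
      simp
      intro hgt
      omega

-- ===== VERDICT (by name: the statement is the Claim_ definition above) =====
theorem analyze_repeated_code_spec : Claim_equal_analyze_repeated_code := by
  intro code_lines _
  unfold Spec_analyze_repeated_code
  exact analyze_repeated_code_main code_lines
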